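-- pv_equiv track=rewrite | github.com/ArcadiaLin/bookalign | bookalign/epub/extractor.py | _sentence_ranges
-- ===== SOURCE A (Python) =====
-- def _sentence_ranges(full_text: str, sentences: list[str]) -> list[tuple[int, int, str]]:
--     ranges: list[tuple[int, int, str]] = []
--     search_from = 0
--
--     for sentence in sentences:
--         if not sentence:
--             continue
--         sent_start = full_text.find(sentence, search_from)
--         if sent_start < 0:
--             stripped = sentence.strip()
--             if stripped:
--                 sent_start = full_text.find(stripped, search_from)
--                 sentence = stripped if sent_start >= 0 else sentence
--         if sent_start < 0:
--             continue
--         sent_end = sent_start + len(sentence)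
--         ranges.append((sent_start, sent_end, full_text[sent_start:sent_end]))
--         search_from = sent_end
--
--     if not ranges:
--         return []
--
--     merged: list[tuple[int, int, str]] = []
--     for idx, (start, end, _) in enumerate(ranges):
--         next_start = ranges[idx + 1][0] if idx + 1 < len(ranges) else len(full_text)
--         adjusted_end = max(end, next_start if idx + 1 < len(ranges) else end)
--         merged.append((start, adjusted_end, full_text[start:adjusted_end].strip()))
--     return [item for item in merged if item[2]]
-- ===== SOURCE B (Python) =====
-- def _sentence_ranges(full_text: str, sentences: list[str]) -> list[tuple[int, int, str]]:
--     # Single pass: locate each sentence and finalize the previous match when the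
--     # next one is found, instead of a locate pass followed by a merge pass.
--     out: list[tuple[int, int, str]] = []
--     pending: tuple[int, int] | None = None  # (start, own end) of the last match
--     search_from = 0
--     for sentence in sentences:
--         if not sentence:
--             continue
--         start = full_text.find(sentence, search_from)
--         if start < 0:
--             stripped = sentence.strip()
--             if stripped:
--                 pos = full_text.find(stripped, search_from)
--                 if pos >= 0:
--                     start = pos
--                     sentence = stripped
--         if start < 0:
--             continue
--         end = start + len(sentence)
--         if pending is not None:
--             ps, pe = pending
--             e = max(pe, start)
--             text = full_text[ps:e].strip()
--             if text:
--                 out.append((ps, e, text))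
--         pending = (start, end)
--         search_from = end
--     if pending is not None:
--         ps, pe = pending
--         text = full_text[ps:pe].strip()
--         if text:
--             out.append((ps, pe, text))
--     return out
-- ===== Notes on version B (the rewrite author's own statement) =====
-- stated objective: simpler
-- what changed: A's two phases (locate every sentence into a ranges list, then an indexed merge pass extending each range's end to the next range's start, then a filter) are fused into a single loop with a one-entry look-back buffer that finalizes the previous match when the next one is found, so the intermediate ranges list, the enumerate/index arithmetic and the separate filter pass disappear.
import Mathlib
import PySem

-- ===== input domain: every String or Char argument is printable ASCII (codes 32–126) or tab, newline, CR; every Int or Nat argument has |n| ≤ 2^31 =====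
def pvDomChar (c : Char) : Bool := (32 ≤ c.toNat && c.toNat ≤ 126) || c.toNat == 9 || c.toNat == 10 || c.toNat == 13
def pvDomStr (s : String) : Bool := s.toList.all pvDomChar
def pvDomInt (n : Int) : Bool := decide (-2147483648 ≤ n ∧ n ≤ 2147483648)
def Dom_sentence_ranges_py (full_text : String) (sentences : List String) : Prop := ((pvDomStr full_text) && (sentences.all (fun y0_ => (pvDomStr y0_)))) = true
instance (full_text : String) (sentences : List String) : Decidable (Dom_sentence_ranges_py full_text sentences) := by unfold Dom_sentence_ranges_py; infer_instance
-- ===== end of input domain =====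

-- B fuses A's two phases (locate all sentences, then a merge pass extending each
-- range to the next one's start) into one loop with a one-entry look-back buffer;
-- objective: simpler (one pass, no index arithmetic), same asymptotic cost.


-- ===== PORT A =====
-- The per-sentence location logic (find, stripped fallback, reassignment) is
-- textually identical in A and B, so it is transliterated once, used by both ports.
def pvLocate1 (full_text sentence : String) (search_from : Int) : Option (Int × String) :=
  let s0 := PySem.Str.findFrom full_text sentence search_from
  if s0 < 0 then
    let stripped := PySem.Str.strip sentence
    if stripped ≠ "" then
      let s1 := PySem.Str.findFrom full_text stripped search_from
      if 0 ≤ s1 then some (s1, stripped) else none   -- 'continue' when still not found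
    else none
  else some (s0, sentence)

-- phase 1 of A: the 'for sentence in sentences' locate loop, state (ranges, search_from)
def pvLocStep (full_text : String) (st : List (Int × Int × String) × Int) (sentence : String) :
    List (Int × Int × String) × Int :=
  if sentence = "" then st else
  match pvLocate1 full_text sentence st.2 with
  | none => st
  | some (s, sent) =>
      let e := s + PySem.Str.len sent
      (st.1 ++ [(s, e, PySem.Str.slice full_text (some s) (some e))], e)

-- phase 2 of A: the 'for idx, (start, end, _) in enumerate(ranges)' merge loop
-- (ranges[idx+1] is pyGetD with a junk default: the guard keeps the index in range)
def pvMergeStep (full_text : String) (ranges : List (Int × Int × String))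
    (merged : List (Int × Int × String)) (x : Int × Int × Int × String) :
    List (Int × Int × String) :=
  let idx := x.1
  let start := x.2.1
  let end_ := x.2.2.1
  let next_start := if idx + 1 < (ranges.length : Int) then
      (PySem.List.pyGetD ranges (idx + 1) (0, 0, "")).1 else PySem.Str.len full_text
  let adjusted_end := max end_ (if idx + 1 < (ranges.length : Int) then next_start else end_)
  merged ++ [(start, adjusted_end,
    PySem.Str.strip (PySem.Str.slice full_text (some start) (some adjusted_end)))]

def sentence_ranges_py (full_text : String) (sentences : List String) : List (Int × Int × String) :=
  let ranges := (sentences.foldl (pvLocStep full_text) ([], 0)).1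
  if ranges = [] then [] else
  let merged := (PySem.List.enumerate ranges).foldl (pvMergeStep full_text ranges) []
  merged.filter (fun item => item.2.2 ≠ "")

-- ===== PORT B =====
-- B's single loop: state (out, pending, search_from); finding the next sentence
-- finalizes the pending one at max(its own end, the new start).
def pvBStep (full_text : String)
    (st : List (Int × Int × String) × Option (Int × Int) × Int) (sentence : String) :
    List (Int × Int × String) × Option (Int × Int) × Int :=
  if sentence = "" then st else
  match pvLocate1 full_text sentence st.2.2 with
  | none => st
  | some (s, sent) =>
      let e := s + PySem.Str.len sent
      let out := match st.2.1 with
        | none => st.1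
        | some (ps, pe) =>
            let ad := max pe s
            let t := PySem.Str.strip (PySem.Str.slice full_text (some ps) (some ad))
            if t = "" then st.1 else st.1 ++ [(ps, ad, t)]
      (out, some (s, e), e)

def sentence_ranges_py_alt (full_text : String) (sentences : List String) :
    List (Int × Int × String) :=
  let st := sentences.foldl (pvBStep full_text) ([], none, 0)
  match st.2.1 with
  | none => st.1
  | some (ps, pe) =>
      let t := PySem.Str.strip (PySem.Str.slice full_text (some ps) (some pe))
      if t = "" then st.1 else st.1 ++ [(ps, pe, t)]

-- ===== PRECONDITION & SPEC =====
def Spec_sentence_ranges_py (full_text : String) (sentences : List String) (out : List (Int × Int × String)) : Prop := out = sentence_ranges_py_alt full_text sentences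
instance (full_text : String) (sentences : List String) (out : List (Int × Int × String)) : Decidable (Spec_sentence_ranges_py full_text sentences out) := by unfold Spec_sentence_ranges_py; infer_instance

-- ===== CLAIM (what is proved, stated in full; the proofs are below) =====
def Claim_equal_sentence_ranges_py : Prop := ∀ (full_text : String) (sentences : List String), Dom_sentence_ranges_py full_text sentences → Spec_sentence_ranges_py full_text sentences (sentence_ranges_py full_text sentences)

-- ===== LEMMAS AND PROOFS =====

-- the pending entry flushed: (ps, pe, stripped slice) if the stripped text is non-empty
def pvFlush (ft : String) (ps pe : Int) : List (Int × Int × String) :=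
  let t := PySem.Str.strip (PySem.Str.slice ft (some ps) (some pe))
  if t = "" then [] else [(ps, pe, t)]

-- B's look-back loop viewed on the list of located entries
def pvLook (ft : String) : Option (Int × Int) → List (Int × Int × String) → List (Int × Int × String)
  | none, [] => []
  | some (ps, pe), [] => pvFlush ft ps pe
  | none, (s, e, _) :: rest => pvLook ft (some (s, e)) rest
  | some (ps, pe), (s, e, _) :: rest => pvFlush ft ps (max pe s) ++ pvLook ft (some (s, e)) rest

-- A's merge pass written structurally (each entry's end extended to the next entry's start)
def pvMergeRec (ft : String) : List (Int × Int × String) → List (Int × Int × String)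
  | [] => []
  | (s, e, _) :: rest =>
      let ad := match rest with | [] => max e e | (s2, _, _) :: _ => max e s2
      (s, ad, PySem.Str.strip (PySem.Str.slice ft (some s) (some ad))) :: pvMergeRec ft rest

-- B's final flush of the pending entry
def pvBFin (ft : String) (st : List (Int × Int × String) × Option (Int × Int) × Int) :
    List (Int × Int × String) :=
  st.1 ++ (match st.2.1 with | none => [] | some (ps, pe) => pvFlush ft ps pe)

-- the located list produced from state (ranges = [], search_from = sf)
def pvLoc (ft : String) (ss : List String) (sf : Int) : List (Int × Int × String) :=
  (ss.foldl (pvLocStep ft) ([], sf)).1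

theorem pvAlt_eq_fin (ft : String) (ss : List String) :
    sentence_ranges_py_alt ft ss = pvBFin ft (ss.foldl (pvBStep ft) ([], none, 0)) := by
  unfold sentence_ranges_py_alt pvBFin
  rcases h : (ss.foldl (pvBStep ft) ([], none, 0)).2.1 with _ | ⟨ps, pe⟩
  · simp [h]
  · simp only [h, pvFlush]
    split <;> simp

theorem pvLoc_append (ft : String) (ss : List String) : ∀ (r : List (Int × Int × String)) (sf : Int),
    ss.foldl (pvLocStep ft) (r, sf) =
      (r ++ (ss.foldl (pvLocStep ft) ([], sf)).1, (ss.foldl (pvLocStep ft) ([], sf)).2) := by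
  induction ss with
  | nil => simp
  | cons s ss ih =>
    intro r sf
    simp only [List.foldl_cons]
    by_cases hs : s = ""
    · simp only [pvLocStep, if_pos hs]
      exact ih r sf
    · cases h : pvLocate1 ft s sf with
      | none => simp only [pvLocStep, if_neg hs, h]; exact ih r sf
      | some v =>
        obtain ⟨st0, sent⟩ := v
        simp only [pvLocStep, if_neg hs, h, List.nil_append]
        rw [ih, ih [(st0, st0 + PySem.Str.len sent,
          PySem.Str.slice ft (some st0) (some (st0 + PySem.Str.len sent)))]]
        simp

theorem pvLoc_cons_skip (ft : String) (s : String) (ss : List String) (sf : Int)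
    (h : pvLocStep ft ([], sf) s = ([], sf)) :
    pvLoc ft (s :: ss) sf = pvLoc ft ss sf := by
  simp [pvLoc, List.foldl_cons, h]

theorem pvLoc_cons_found (ft : String) (s : String) (ss : List String) (sf : Int)
    (st0 : Int) (sent : String) (hs : ¬ s = "") (h : pvLocate1 ft s sf = some (st0, sent)) :
    pvLoc ft (s :: ss) sf =
      (st0, st0 + PySem.Str.len sent,
        PySem.Str.slice ft (some st0) (some (st0 + PySem.Str.len sent)))
        :: pvLoc ft ss (st0 + PySem.Str.len sent) := by
  simp only [pvLoc, List.foldl_cons, pvLocStep, if_neg hs, h]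
  rw [pvLoc_append]
  simp

theorem pvB_look (ft : String) (ss : List String) :
    ∀ (out : List (Int × Int × String)) (pend : Option (Int × Int)) (sf : Int),
    pvBFin ft (ss.foldl (pvBStep ft) (out, pend, sf)) = out ++ pvLook ft pend (pvLoc ft ss sf) := by
  induction ss with
  | nil =>
    intro out pend sf
    rcases pend with _ | ⟨ps, pe⟩ <;> simp [pvBFin, pvLook, pvLoc]
  | cons s ss ih =>
    intro out pend sf
    simp only [List.foldl_cons]
    by_cases hs : s = ""
    · rw [show pvBStep ft (out, pend, sf) s = (out, pend, sf) by simp [pvBStep, hs],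
        pvLoc_cons_skip ft s ss sf (by simp [pvLocStep, hs])]
      exact ih out pend sf
    · cases h : pvLocate1 ft s sf with
      | none =>
        rw [show pvBStep ft (out, pend, sf) s = (out, pend, sf) by simp [pvBStep, hs, h],
          pvLoc_cons_skip ft s ss sf (by simp [pvLocStep, hs, h])]
        exact ih out pend sf
      | some v =>
        obtain ⟨st0, sent⟩ := v
        rw [pvLoc_cons_found ft s ss sf st0 sent hs h]
        simp only [pvBStep, if_neg hs, h]
        rcases pend with _ | ⟨ps, pe⟩
        · rw [ih]; simp [pvLook]
        · rw [ih]
          simp only [pvLook, pvFlush]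
          split <;> simp

theorem pvMerge_enum (ft : String) (L : List (Int × Int × String)) :
    ∀ (t : List (Int × Int × String)) (k : Nat) (acc : List (Int × Int × String)),
    L.drop k = t →
    (PySem.List.enumerate t (k : Int)).foldl (pvMergeStep ft L) acc = acc ++ pvMergeRec ft t := by
  intro t
  induction t with
  | nil => intro k acc _; simp [PySem.List.enumerate, pvMergeRec]
  | cons x rest ih =>
    intro k acc hdrop
    obtain ⟨s, e, tx⟩ := x
    have hlen : L.length = k + rest.length + 1 := by
      have h1 := congrArg List.length hdrop
      simp only [List.length_drop, List.length_cons] at h1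
      omega
    rw [show PySem.List.enumerate ((s, e, tx) :: rest) (k : Int)
        = ((k : Int), (s, e, tx)) :: PySem.List.enumerate rest ((k : Int) + 1) from rfl]
    rw [List.foldl_cons]
    rw [show ((k : Int) + 1) = ((k + 1 : Nat) : Int) by push_cast; ring]
    rw [ih (k + 1) _ (by rw [← List.drop_drop, hdrop]; rfl)]
    cases rest with
    | nil =>
      have hguard : ¬ ((k : Int) + 1 < (L.length : Int)) := by
        simp only [hlen, List.length_nil]; push_cast; omega
      simp [pvMergeStep, pvMergeRec, hguard]
    | cons y rest' =>
      obtain ⟨s2, e2, t2⟩ := y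
      have hguard : ((k : Int) + 1 < (L.length : Int)) := by
        simp only [hlen, List.length_cons]; push_cast; omega
      have hget : PySem.List.pyGetD L ((k : Int) + 1) ((0 : Int), (0 : Int), "") = (s2, e2, t2) := by
        rw [show ((k : Int) + 1) = ((k + 1 : Nat) : Int) by push_cast; ring,
          PySem.List.pyGetD_natCast]
        have : L[k + 1]? = some (s2, e2, t2) := by
          rw [show k + 1 = k + 1 from rfl, ← List.getElem?_drop, hdrop]
          rfl
        simp [List.getD, this]
      simp [pvMergeStep, pvMergeRec, hguard, hget]

theorem pvFilter_merge (ft : String) :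
    ∀ (rest : List (Int × Int × String)) (ps pe : Int) (tx : String),
    (pvMergeRec ft ((ps, pe, tx) :: rest)).filter (fun item => item.2.2 ≠ "")
      = pvLook ft (some (ps, pe)) rest := by
  intro rest
  induction rest with
  | nil =>
    intro ps pe tx
    simp only [pvMergeRec, pvLook, pvFlush, List.filter, max_self]
    split <;> simp_all
  | cons y rest' ih =>
    intro ps pe tx
    obtain ⟨s2, e2, t2⟩ := y
    show ((ps, max pe s2, PySem.Str.strip (PySem.Str.slice ft (some ps) (some (max pe s2))))
        :: pvMergeRec ft ((s2, e2, t2) :: rest')).filter (fun item => item.2.2 ≠ "")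
      = pvFlush ft ps (max pe s2) ++ pvLook ft (some (s2, e2)) rest'
    rw [List.filter_cons, ih s2 e2 t2]
    simp only [pvFlush]
    split <;> simp_all

theorem pvLook_none (ft : String) (L : List (Int × Int × String)) :
    (pvMergeRec ft L).filter (fun item => item.2.2 ≠ "") = pvLook ft none L := by
  cases L with
  | nil => simp [pvMergeRec, pvLook]
  | cons x rest =>
    obtain ⟨s, e, tx⟩ := x
    rw [pvFilter_merge]
    rfl

theorem pvMerge_enum0 (ft : String) (L : List (Int × Int × String)) :
    (PySem.List.enumerate L).foldl (pvMergeStep ft L) [] = pvMergeRec ft L := by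
  have h := pvMerge_enum ft L L 0 [] (by simp)
  simpa using h

-- ===== VERDICT (by name: the statement is the Claim_ definition above) =====
theorem sentence_ranges_py_spec : Claim_equal_sentence_ranges_py := by
  intro ft ss _
  unfold Spec_sentence_ranges_py
  rw [pvAlt_eq_fin, pvB_look]
  simp only [sentence_ranges_py]
  have hfold : (List.foldl (pvLocStep ft) ([], 0) ss).1 = pvLoc ft ss 0 := rfl
  rw [hfold, List.nil_append]
  by_cases hL : pvLoc ft ss 0 = []
  · simp [hL, pvLook]
  · rw [if_neg hL, pvMerge_enum0, pvLook_none]
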